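-- pv_equiv track=rewrite | github.com/tsunrise/sumcheck_multilinear | multilinear_extension.py | evaluate
-- ===== SOURCE A (Python) =====
-- from typing import List, Dict
--
-- def evaluate(data: List[int], arguments: List[int],  fieldSize: int) -> int:
--     """
--     Directly evaluate a polynomial based on multilinear extension. The function takes linear time to the size of data.
--     :param data: The bookkeeping table (where the multilinear extension is based on)
--     :param arguments: Input argument
--     :param fieldSize:
--     :return:
--     """
--
--     L = len(arguments)
--     p = fieldSize
--     assert len(data) <= (1 << L), "Insufficient data"
--
--     A: List[int] = data.copy()
--     if len(A) < (1 << L):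
--         A += [0] * (1 << L - len(A))
--     for i in range(1, L + 1):
--         r = arguments[i-1]
--         for b in range(2**(L-i)):
--             A[b] = (A[b << 1] * (1 - r) + A[(b << 1) + 1] * r) % p
--     return A[0]
-- ===== SOURCE B (Python) =====
-- def evaluate(data, arguments, fieldSize):
--     """Evaluate the multilinear extension of data at the given point, as one
--     direct weighted sum: table entry b contributes A[b] times the product over
--     j of arguments[j] (bit j of b set) or 1 - arguments[j] (bit j clear)."""
--     L = len(arguments)
--     assert len(data) <= (1 << L), "Insufficient data"
--
--     A = data.copy()
--     if len(A) < (1 << L):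
--         A += [0] * (1 << L - len(A))
--     total = 0
--     for b in range(1 << L):
--         term = A[b]
--         for j in range(L):
--             term *= arguments[j] if (b >> j) & 1 else 1 - arguments[j]
--         total += term
--     return total % fieldSize
-- ===== Notes on version B (the rewrite author's own statement) =====
-- stated objective: alternative
-- what changed: B replaces A's L rounds of in-place pairwise folding of the padded table by one direct pass summing A[b] times the product of bit-selected weights (arguments[j] if bit j of b is set, else 1-arguments[j]), reducing mod fieldSize once at the end; Pre_ excludes fieldSize=0 with empty arguments, where A returns unreduced but B's final % raises.
-- intended difference: When arguments is empty (and data's entry is not already a canonical residue), A returns the table entry unreduced because its loop never applies % p, while B returns it reduced mod fieldSize, the intended canonical field element. — e.g. on evaluate([5], [], 3): A returns 5, B returns 2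
-- outside the precondition, e.g. on evaluate([5], [], 0): A returns 5, B raises ZeroDivisionError
import Mathlib
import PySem

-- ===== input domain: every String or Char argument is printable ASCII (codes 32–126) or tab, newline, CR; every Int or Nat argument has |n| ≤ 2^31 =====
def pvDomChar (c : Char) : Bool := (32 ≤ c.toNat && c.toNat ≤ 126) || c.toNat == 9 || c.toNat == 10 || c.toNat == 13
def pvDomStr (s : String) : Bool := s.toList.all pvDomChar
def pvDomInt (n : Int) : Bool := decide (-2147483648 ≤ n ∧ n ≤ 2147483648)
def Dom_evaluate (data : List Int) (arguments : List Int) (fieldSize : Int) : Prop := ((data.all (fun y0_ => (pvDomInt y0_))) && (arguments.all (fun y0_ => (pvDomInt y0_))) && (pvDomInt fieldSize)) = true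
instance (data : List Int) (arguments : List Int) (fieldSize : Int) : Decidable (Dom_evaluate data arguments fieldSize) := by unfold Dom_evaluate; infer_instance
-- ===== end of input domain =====

-- B evaluates the multilinear extension as a direct weighted sum over the padded
-- table instead of A's L rounds of in-place pairwise folding, reducing mod
-- fieldSize once at the end (objective: alternative decomposition).

-- ===== PORT A =====
-- one in-place update A[b] = (A[b<<1]*(1-r) + A[(b<<1)+1]*r) % p of Python A's inner loop body
def pvInnerPass (r p : Int) (A : List Int) (b : Nat) : List Int :=
  A.set b (PySem.Int.mod (A.getD (2 * b) 0 * (1 - r) + A.getD (2 * b + 1) 0 * r) p)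

def evaluate (data : List Int) (arguments : List Int) (fieldSize : Int) : Int :=
  let L := arguments.length
  let p := fieldSize
  -- A = data.copy(); if len(A) < (1 << L): A += [0] * (1 << L - len(A))
  -- (Python's padding count is 1 << (L - len(A)), the precedence as written)
  let A0 := if data.length < 2 ^ L then data ++ List.replicate (2 ^ (L - data.length)) 0 else data
  -- for i in range(1, L+1): r = arguments[i-1]; for b in range(2**(L-i)): A[b] = ...
  -- (here i runs 0..L-1, so r = arguments[i] and the inner bound is 2^(L-(i+1)))
  let A1 := (List.range L).foldl
    (fun A i => (List.range (2 ^ (L - (i + 1)))).foldl (pvInnerPass (arguments.getD i 0) p) A) A0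
  A1.getD 0 0

-- ===== PORT B =====
def evaluate_alt (data : List Int) (arguments : List Int) (fieldSize : Int) : Int :=
  let L := arguments.length
  -- same padding as the source: A = data.copy(); if len(A) < (1 << L): A += [0] * (1 << L - len(A))
  let A := if data.length < 2 ^ L then data ++ List.replicate (2 ^ (L - data.length)) 0 else data
  let total := (List.range (2 ^ L)).foldl
    (fun acc b =>
      acc + (List.range L).foldl
        (fun t j => t * (if (b >>> j) % 2 = 1 then arguments.getD j 0 else 1 - arguments.getD j 0))
        (A.getD b 0))
    0
  PySem.Int.mod total fieldSize

-- ===== PRECONDITION & SPEC =====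
-- Pre_ excludes (a) inputs where Python A raises: the assert len(data) <= 2^L must
-- pass, `% p` needs fieldSize ≠ 0, and the padding `[0] * (1 << L - len(A))` must
-- reach length 2^L (only when len(data) is 0 or 2^L, or L = 1) or the table stays
-- short and indexing raises (Assertion-/ZeroDivision-/Value-/IndexError); and
-- (b) fieldSize = 0 with arguments = [], where A returns the entry unreduced but
-- B's single final `% fieldSize` raises ZeroDivisionError.
def Pre_evaluate (data : List Int) (arguments : List Int) (fieldSize : Int) : Prop :=
  data.length ≤ 2 ^ arguments.length ∧ fieldSize ≠ 0 ∧
  (arguments = [] ∨ data.length = 0 ∨ data.length = 2 ^ arguments.length ∨ arguments.length = 1)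
instance (data : List Int) (arguments : List Int) (fieldSize : Int) : Decidable (Pre_evaluate data arguments fieldSize) := by unfold Pre_evaluate; infer_instance

def pvWitness_evaluate : List Int × List Int × Int := ([3, 1, 4, 1], [5, 7], 13)

-- When arguments is empty A returns the table entry UNREDUCED (its loop never runs,
-- so `% p` is never applied) while B returns it reduced mod fieldSize, the intended
-- canonical field element; D_ holds exactly when that entry is not already canonical.
def D_evaluate (data : List Int) (arguments : List Int) (fieldSize : Int) : Prop :=
  arguments = [] ∧ data ≠ [] ∧
  ¬ ((0 < fieldSize ∧ 0 ≤ data.headD 0 ∧ data.headD 0 < fieldSize) ∨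
     (fieldSize < 0 ∧ fieldSize < data.headD 0 ∧ data.headD 0 ≤ 0))
instance (data : List Int) (arguments : List Int) (fieldSize : Int) : Decidable (D_evaluate data arguments fieldSize) := by unfold D_evaluate; infer_instance

def Spec_evaluate (data : List Int) (arguments : List Int) (fieldSize : Int) (out : Int) : Prop := ¬ D_evaluate data arguments fieldSize → out = evaluate_alt data arguments fieldSize
instance (data : List Int) (arguments : List Int) (fieldSize : Int) (out : Int) : Decidable (Spec_evaluate data arguments fieldSize out) := by unfold Spec_evaluate; infer_instance

def pvDiffWitness_evaluate : List Int × List Int × Int := ([5], [], 3)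
def pvDiffWitnessOut_evaluate : Int × Int := (5, 2)

-- ===== CLAIM (what is proved, stated in full; the proofs are below) =====
def Claim_unchanged_evaluate : Prop := ∀ (data : List Int) (arguments : List Int) (fieldSize : Int), Dom_evaluate data arguments fieldSize → Pre_evaluate data arguments fieldSize → Spec_evaluate data arguments fieldSize (evaluate data arguments fieldSize)
def Claim_changed_evaluate : Prop := Dom_evaluate (pvDiffWitness_evaluate.1) (pvDiffWitness_evaluate.2.1) (pvDiffWitness_evaluate.2.2) ∧ Pre_evaluate (pvDiffWitness_evaluate.1) (pvDiffWitness_evaluate.2.1) (pvDiffWitness_evaluate.2.2) ∧ D_evaluate (pvDiffWitness_evaluate.1) (pvDiffWitness_evaluate.2.1) (pvDiffWitness_evaluate.2.2) ∧ evaluate (pvDiffWitness_evaluate.1) (pvDiffWitness_evaluate.2.1) (pvDiffWitness_evaluate.2.2) = pvDiffWitnessOut_evaluate.1 ∧ evaluate_alt (pvDiffWitness_evaluate.1) (pvDiffWitness_evaluate.2.1) (pvDiffWitness_evaluate.2.2) = pvDiffWitnessOut_evaluate.2 ∧ pvDiffWitnessOut_evaluate.1 ≠ pvDiffWitnessOu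t_evaluate.2
def Claim_exact_evaluate : Prop := ∀ (data : List Int) (arguments : List Int) (fieldSize : Int), Dom_evaluate data arguments fieldSize → Pre_evaluate data arguments fieldSize → D_evaluate data arguments fieldSize → evaluate data arguments fieldSize ≠ evaluate_alt data arguments fieldSize

-- ===== LEMMAS AND PROOFS =====

-- weight of table index b for the argument list ws (bit 0 of b selects the head)
def pvW : List Int → Nat → Int
  | [], _ => 1
  | r :: rs, b => (if b % 2 = 1 then r else 1 - r) * pvW rs (b / 2)

-- the multilinear sum against a table given as a function
def pvS (ws : List Int) (F : Nat → Int) : Int :=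
  ∑ b ∈ Finset.range (2 ^ ws.length), F b * pvW ws b

-- one folding pass of A, on tables-as-functions
def pvPassF (r p : Int) (F : Nat → Int) : Nat → Int :=
  fun b => PySem.Int.mod (F (2 * b) * (1 - r) + F (2 * b + 1) * r) p

def pvRunF : List Int → Int → (Nat → Int) → (Nat → Int)
  | [], _, F => F
  | r :: rs, p, F => pvRunF rs p (pvPassF r p F)

theorem pv_getD_set_self (l : List Int) (i : Nat) (a : Int) (h : i < l.length) :
    (l.set i a).getD i 0 = a := by
  simp [List.getD, h]

theorem pv_getD_set_ne (l : List Int) (i j : Nat) (a : Int) (h : i ≠ j) :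
    (l.set i a).getD j 0 = l.getD j 0 := by
  simp [List.getD, h]

theorem pv_pair_sum (n : Nat) (f : Nat → Int) :
    ∑ b ∈ Finset.range (2 * n), f b = ∑ b ∈ Finset.range n, (f (2 * b) + f (2 * b + 1)) := by
  induction n with
  | zero => simp
  | succ n ih =>
      have h2 : 2 * (n + 1) = (2 * n + 1) + 1 := by omega
      rw [h2, Finset.sum_range_succ, Finset.sum_range_succ, Finset.sum_range_succ, ih]
      ring_nf

theorem pvS_cons (r : Int) (rs : List Int) (F : Nat → Int) :
    pvS (r :: rs) F = pvS rs (fun b => F (2 * b) * (1 - r) + F (2 * b + 1) * r) := by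
  unfold pvS
  have hlen : 2 ^ (r :: rs).length = 2 * 2 ^ rs.length := by
    simp [List.length_cons, pow_succ]; ring
  rw [hlen, pv_pair_sum]
  refine Finset.sum_congr rfl (fun b _ => ?_)
  have h1 : (2 * b) % 2 = 0 := by omega
  have h2 : (2 * b) / 2 = b := by omega
  have h3 : (2 * b + 1) % 2 = 1 := by omega
  have h4 : (2 * b + 1) / 2 = b := by omega
  simp [pvW, h1, h2, h3, h4]
  ring

theorem pv_dvd_mod_sub (a p : Int) : p ∣ PySem.Int.mod a p - a := by
  have h := PySem.Int.floordiv_mul_add_mod a p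
  exact ⟨-(PySem.Int.floordiv a p), by linarith⟩

theorem pv_mod_congr {a b p : Int} (h : p ∣ a - b) :
    PySem.Int.mod a p = PySem.Int.mod b p := by
  obtain ⟨k, hk⟩ := h
  have hab : a = b + p * k := by linarith
  subst hab
  show (b + p * k).fmod p = b.fmod p
  exact Int.add_mul_fmod_self_left b p k

theorem pvS_congr (rs : List Int) (p : Int) (F G : Nat → Int)
    (h : ∀ b, p ∣ F b - G b) : p ∣ pvS rs F - pvS rs G := by
  unfold pvS
  rw [← Finset.sum_sub_distrib]
  refine Finset.dvd_sum (fun b _ => ?_)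
  have hb : F b * pvW rs b - G b * pvW rs b = (F b - G b) * pvW rs b := by ring
  rw [hb]
  exact Dvd.dvd.mul_right (h b) _

theorem pvRunF_eq_mod_S (rs : List Int) (r p : Int) (F : Nat → Int) :
    pvRunF (r :: rs) p F 0 = PySem.Int.mod (pvS (r :: rs) F) p := by
  induction rs generalizing r F with
  | nil =>
      show pvPassF r p F 0 = _
      have hS : pvS [r] F = F 0 * (1 - r) + F 1 * r := by
        unfold pvS
        rw [show (2:Nat) ^ ([r].length) = 2 from rfl]
        rw [Finset.sum_range_succ, Finset.sum_range_succ, Finset.sum_range_zero]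
        simp [pvW]
      rw [hS]
      simp [pvPassF]
  | cons r' rs' ih =>
      show pvRunF (r' :: rs') p (pvPassF r p F) 0 = _
      rw [ih r' (pvPassF r p F)]
      refine pv_mod_congr ?_
      rw [pvS_cons r (r' :: rs') F]
      exact pvS_congr _ _ _ _ (fun b => pv_dvd_mod_sub _ _)

theorem pvInner_length (r p : Int) (n : Nat) (A : List Int) :
    ((List.range n).foldl (pvInnerPass r p) A).length = A.length := by
  induction n generalizing A with
  | zero => rfl
  | succ n ih =>
      rw [List.range_succ, List.foldl_append]
      simp [ih, pvInnerPass]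

theorem pvInner_getD (r p : Int) (n : Nat) (A : List Int) (hn : n ≤ A.length) (j : Nat) :
    ((List.range n).foldl (pvInnerPass r p) A).getD j 0 =
      if j < n then PySem.Int.mod (A.getD (2 * j) 0 * (1 - r) + A.getD (2 * j + 1) 0 * r) p
      else A.getD j 0 := by
  induction n generalizing j with
  | zero => simp
  | succ n ih =>
      rw [List.range_succ, List.foldl_append]
      have hlen : ((List.range n).foldl (pvInnerPass r p) A).length = A.length :=
        pvInner_length r p n A
      have hn' : n ≤ A.length := by omega
      simp only [List.foldl_cons, List.foldl_nil]
      show (((List.range n).foldl (pvInnerPass r p) A).set n _).getD j 0 = _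
      by_cases hj : j = n
      · subst hj
        have hjl : j < ((List.range j).foldl (pvInnerPass r p) A).length := by omega
        rw [pv_getD_set_self _ _ _ hjl]
        have hget2 : ((List.range j).foldl (pvInnerPass r p) A).getD (2 * j) 0 = A.getD (2 * j) 0 := by
          rw [ih hn']; simp [show ¬ (2 * j < j) by omega]
        have hget3 : ((List.range j).foldl (pvInnerPass r p) A).getD (2 * j + 1) 0 = A.getD (2 * j + 1) 0 := by
          rw [ih hn']; simp [show ¬ (2 * j + 1 < j) by omega]
        rw [hget2, hget3]
        simp [show j < j + 1 by omega]
      · rw [pv_getD_set_ne _ _ _ _ (fun h => hj h.symm), ih hn']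
        by_cases h1 : j < n
        · simp [h1, show j < n + 1 by omega]
        · simp [h1, show ¬ (j < n + 1) by omega]

theorem pv_getD_of_drop (args : List Int) (i : Nat) (r : Int) (rs : List Int)
    (hdrop : args.drop i = r :: rs) : args.getD i 0 = r := by
  have h0 : (args.drop i)[0]? = some r := by rw [hdrop]; rfl
  rw [List.getElem?_drop] at h0
  simp only [Nat.add_zero] at h0
  simp [List.getD, h0]

theorem pvOuter (args : List Int) (p : Int) :
    ∀ (rs : List Int) (i : Nat) (A : List Int) (F : Nat → Int),
      args.drop i = rs → i + rs.length = args.length →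
      2 ^ rs.length ≤ A.length →
      (∀ b, b < 2 ^ rs.length → A.getD b 0 = F b) →
      ((List.range' i rs.length).foldl
          (fun A j => (List.range (2 ^ (args.length - (j + 1)))).foldl (pvInnerPass (args.getD j 0) p) A) A).getD 0 0
        = pvRunF rs p F 0 := by
  intro rs
  induction rs with
  | nil =>
      intro i A F _ _ _ hagree
      simpa using hagree 0 (by norm_num)
  | cons r rs' ih =>
      intro i A F hdrop hlen hA hagree
      have hgi : args.getD i 0 = r := pv_getD_of_drop args i r rs' hdrop
      have hexp : args.length - (i + 1) = rs'.length := by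
        simp only [List.length_cons] at hlen; omega
      have hdrop' : args.drop (i + 1) = rs' := by
        have ht := congrArg List.tail hdrop
        simpa [List.tail_drop] using ht
      have hpow : 2 ^ rs'.length ≤ A.length := by
        have : (2:Nat) ^ rs'.length ≤ 2 ^ (r :: rs').length := by
          apply Nat.pow_le_pow_right (by norm_num); simp
        omega
      show ((List.range' (i + 1) rs'.length).foldl _
          ((List.range (2 ^ (args.length - (i + 1)))).foldl (pvInnerPass (args.getD i 0) p) A)).getD 0 0 = _
      rw [hgi, hexp]
      have hA1len : ((List.range (2 ^ rs'.length)).foldl (pvInnerPass r p) A).length = A.length :=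
        pvInner_length r p _ A
      refine ih (i + 1) _ (pvPassF r p F) hdrop' (by simp only [List.length_cons] at hlen ⊢; omega)
        (by omega) ?_
      intro b hb
      rw [pvInner_getD r p _ A hpow b]
      have hb2 : 2 * b < 2 ^ (r :: rs').length := by
        simp only [List.length_cons, pow_succ]; omega
      have hb3 : 2 * b + 1 < 2 ^ (r :: rs').length := by
        simp only [List.length_cons, pow_succ]; omega
      rw [if_pos hb, hagree (2 * b) hb2, hagree (2 * b + 1) hb3]
      rfl

theorem pv_foldl_sum (g : Nat → Int) (n : Nat) :
    ∀ (init : Int), (List.range n).foldl (fun acc b => acc + g b) init = init + ∑ b ∈ Finset.range n, g b := by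
  induction n with
  | zero => intro init; simp
  | succ n ih =>
      intro init
      rw [List.range_succ, List.foldl_append, ih init, Finset.sum_range_succ]
      simp [add_assoc]

theorem pv_prod (args : List Int) (b : Nat) :
    ∀ (rs : List Int) (j : Nat) (t : Int), args.drop j = rs →
      (List.range' j rs.length).foldl
          (fun t k => t * (if (b >>> k) % 2 = 1 then args.getD k 0 else 1 - args.getD k 0)) t
        = t * pvW rs (b >>> j) := by
  intro rs
  induction rs with
  | nil => intro j t _; simp [pvW]
  | cons r rs' ih =>
      intro j t hdrop
      have hgj : args.getD j 0 = r := pv_getD_of_drop args j r rs' hdrop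
      have hdrop' : args.drop (j + 1) = rs' := by
        have ht := congrArg List.tail hdrop
        simpa [List.tail_drop] using ht
      show (List.range' (j + 1) rs'.length).foldl _
          (t * (if (b >>> j) % 2 = 1 then args.getD j 0 else 1 - args.getD j 0)) = _
      rw [ih (j + 1) _ hdrop', hgj]
      have hshift : b >>> (j + 1) = (b >>> j) / 2 := Nat.shiftRight_succ b j ▸ rfl
      rw [hshift]
      show _ = t * ((if (b >>> j) % 2 = 1 then r else 1 - r) * pvW rs' ((b >>> j) / 2))
      ring

-- on Pre_'s shapes the padding `1 << (L - len)` brings the table to length exactly 2^L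
theorem pvPad_length (data : List Int) (L : Nat) (hle : data.length ≤ 2 ^ L)
    (hs : data.length = 0 ∨ data.length = 2 ^ L ∨ L ≤ 1) :
    (if data.length < 2 ^ L then data ++ List.replicate (2 ^ (L - data.length)) 0 else data).length
      = 2 ^ L := by
  rcases hs with h0 | h2 | h1
  · rw [h0, if_pos (by simp)]
    simp [h0]
  · rw [if_neg (by omega)]
    exact h2
  · interval_cases L
    · interval_cases h : data.length <;> simp_all
    · interval_cases h : data.length <;> simp_all

theorem pv_mod_eq_self (d p : Int)
    (h : (0 < p ∧ 0 ≤ d ∧ d < p) ∨ (p < 0 ∧ p < d ∧ d ≤ 0)) :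
    PySem.Int.mod d p = d := by
  obtain ⟨k, hk⟩ := pv_dvd_mod_sub d p
  rcases h with ⟨hp, h0, h1⟩ | ⟨hp, h0, h1⟩
  · have hm0 := PySem.Int.mod_nonneg d hp
    have hm1 := PySem.Int.mod_lt d hp
    have hk0 : k = 0 := by nlinarith
    rw [hk0] at hk; linarith
  · have hb := PySem.Int.mod_neg_bounds d hp
    have hk0 : k = 0 := by nlinarith [hb.1, hb.2]
    rw [hk0] at hk; linarith

-- computing both ports on a singleton table with no arguments
theorem pv_eval_nil (data : List Int) (p : Int) (hle : data.length ≤ 1) :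
    evaluate data [] p = data.headD 0 ∧ evaluate_alt data [] p = PySem.Int.mod (data.headD 0) p := by
  rcases data with _ | ⟨d, tl⟩
  · constructor <;> rfl
  · have htl : tl = [] := by
      simp only [List.length_cons] at hle
      exact List.eq_nil_of_length_eq_zero (by omega)
    subst htl
    constructor
    · rfl
    · simp [evaluate_alt]

theorem pv_total_eq (A arguments : List Int) :
    (List.range (2 ^ arguments.length)).foldl
        (fun acc b =>
          acc + (List.range arguments.length).foldl
            (fun t j => t * (if (b >>> j) % 2 = 1 then arguments.getD j 0 else 1 - arguments.getD j 0))
            (A.getD b 0))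
        0
      = pvS arguments (fun b => A.getD b 0) := by
  rw [pv_foldl_sum, zero_add]
  refine Finset.sum_congr rfl (fun b _ => ?_)
  have h := pv_prod arguments b arguments 0 (A.getD b 0) (by simp)
  rw [← List.range_eq_range', Nat.shiftRight_zero] at h
  exact h

-- ===== VERDICT (by name: the statements are the Claim_ definitions above) =====
theorem evaluate_spec : Claim_unchanged_evaluate := by
  intro data arguments fieldSize _ hpre hnd
  obtain ⟨hle, hp, hshape⟩ := hpre
  show evaluate data arguments fieldSize = evaluate_alt data arguments fieldSize
  rcases harg : arguments with _ | ⟨r, rs⟩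
  · -- arguments = []: A returns the entry, B reduces it; ¬D_ makes them equal
    subst harg
    simp only [List.length_nil, pow_zero] at hle
    obtain ⟨hA, hB⟩ := pv_eval_nil data fieldSize hle
    rw [hA, hB]
    rcases hd : data with _ | ⟨d, tl⟩
    · show (0:Int) = PySem.Int.mod 0 fieldSize
      show (0:Int) = Int.fmod 0 fieldSize
      simp
    · rw [hd] at hnd
      have hcanon : (0 < fieldSize ∧ 0 ≤ d ∧ d < fieldSize) ∨
          (fieldSize < 0 ∧ fieldSize < d ∧ d ≤ 0) := by
        by_contra hc
        exact hnd ⟨rfl, by simp, by simpa using hc⟩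
      exact (pv_mod_eq_self d fieldSize hcanon).symm
  · subst harg
    have hshape' : data.length = 0 ∨ data.length = 2 ^ (r :: rs).length ∨ (r :: rs).length ≤ 1 := by
      rcases hshape with h | h | h | h
      · exact absurd h (by simp)
      · exact Or.inl h
      · exact Or.inr (Or.inl h)
      · exact Or.inr (Or.inr (by omega))
    unfold evaluate evaluate_alt
    simp only []
    rw [pv_total_eq]
    have hPlen := pvPad_length data (r :: rs).length hle hshape'
    have hmain := pvOuter (r :: rs) fieldSize (r :: rs) 0
      (if data.length < 2 ^ (r :: rs).length then
          data ++ List.replicate (2 ^ ((r :: rs).length - data.length)) 0 else data)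
      (fun b => (if data.length < 2 ^ (r :: rs).length then
          data ++ List.replicate (2 ^ ((r :: rs).length - data.length)) 0 else data).getD b 0)
      (by simp) (by simp) (by omega) (fun b _ => rfl)
    rw [← List.range_eq_range'] at hmain
    rw [hmain, pvRunF_eq_mod_S]

theorem evaluate_changed : Claim_changed_evaluate := by
  unfold Claim_changed_evaluate; decide

theorem evaluate_tight : Claim_exact_evaluate := by
  intro data arguments fieldSize _ hpre hD
  obtain ⟨hle, hp, _⟩ := hpre
  obtain ⟨harg, hdne, hcanon⟩ := hD
  subst harg
  simp only [List.length_nil, pow_zero] at hle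
  obtain ⟨hA, hB⟩ := pv_eval_nil data fieldSize hle
  rw [hA, hB]
  intro heq
  apply hcanon
  rcases lt_trichotomy fieldSize 0 with hneg | hzero | hpos
  · have hb := PySem.Int.mod_neg_bounds (data.headD 0) hneg
    rw [← heq] at hb
    exact Or.inr ⟨hneg, hb.1, hb.2⟩
  · exact absurd hzero hp
  · have h0 := PySem.Int.mod_nonneg (data.headD 0) hpos
    have h1 := PySem.Int.mod_lt (data.headD 0) hpos
    rw [← heq] at h0 h1
    exact Or.inl ⟨hpos, h0, h1⟩
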